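-- pv_equiv track=rewrite | github.com/neungkl/nsa-encryption-breaker | decryption.py | find_near_key
-- ===== SOURCE A (Python) =====
-- def nsa_encrypt(key, text) :
--     result = 0
--     for i in range(0, len(text)) :
--         result = result + ord(text[i:i+1])
--         result = result * key
--     return result
--
-- def find_near_key(hash, sample_text) :
--     [l,r] = [0, hash // 2]
--     lens = len(sample_text)
--     while l <= r :
--         c = (l + r) // 2
--         if nsa_encrypt(c, sample_text) < hash :
--             l = c + 1
--         else :
--             r = c - 1
--     return l
-- ===== SOURCE B (Python) =====
-- def nsa_encrypt(key, text) :
--     result = 0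
--     for i in range(0, len(text)) :
--         result = result + ord(text[i:i+1])
--         result = result * key
--     return result
--
-- def find_near_key(hash, sample_text):
--     # smallest key c in [0, hash//2] with nsa_encrypt(c, sample_text) >= hash,
--     # else hash//2 + 1 -- found by a bitwise doubling search (Shar's algorithm):
--     # the answer is assembled by adding descending powers of two, no l/r/midpoint state.
--     n = hash // 2 + 1
--     b = 1
--     while 2 * b <= n:
--         b = 2 * b
--     c = 0
--     while b >= 1:
--         if c + b <= n and nsa_encrypt(c + b - 1, sample_text) < hash:
--             c = c + b
--         b = b // 2
--     return c
-- ===== Notes on version B (the rewrite author's own statement) =====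
-- stated objective: alternative
-- what changed: Replaces the l/r-midpoint binary search with a bitwise doubling search (Shar's algorithm): it first doubles a power of two past the range size hash//2+1, then assembles the answer by adding descending powers of two, probing nsa_encrypt once per bit; correctness rests on nsa_encrypt being non-decreasing in the key (non-negative ord coefficients).
import Mathlib
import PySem

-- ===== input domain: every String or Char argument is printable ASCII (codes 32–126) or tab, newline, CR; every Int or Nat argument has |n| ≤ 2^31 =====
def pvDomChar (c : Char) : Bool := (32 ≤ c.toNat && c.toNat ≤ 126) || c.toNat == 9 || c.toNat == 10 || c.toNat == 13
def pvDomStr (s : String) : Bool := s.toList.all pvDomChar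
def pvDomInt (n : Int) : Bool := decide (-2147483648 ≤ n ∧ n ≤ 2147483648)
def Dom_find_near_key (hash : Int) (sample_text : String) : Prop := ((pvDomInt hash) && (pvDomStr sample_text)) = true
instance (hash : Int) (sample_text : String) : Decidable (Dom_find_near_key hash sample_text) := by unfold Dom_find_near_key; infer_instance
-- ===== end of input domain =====

-- B replaces A's l/r-midpoint binary search by a bitwise doubling search (Shar's algorithm)
-- that assembles the answer from descending powers of two; same cost class (objective: alternative).
-- The while-loops of both ports are written as structural recursion on a fuel that is
-- provably sufficient (each loop body strictly shrinks the corresponding measure).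

-- ===== PORT A =====
-- ord(text[i:i+1]): ord of a one-character slice; exact for every index the loop visits
-- (0 ≤ i < len(text), where the slice has length exactly 1; ord raises on other lengths, unreachable here).
def pyOrd1 (cs : List Char) : Int :=
  match cs with
  | [c] => (c.toNat : Int)
  | _ => 0

def nsa_encrypt (key : Int) (text : String) : Int :=
  (PySem.List.pyRange 0 (text.toList.length : Int) 1).foldl
    (fun result i =>
      (result + pyOrd1 (PySem.List.slice text.toList (some i) (some (i + 1)))) * key) 0

-- while l <= r: … — fuel (r + 1 - l).toNat suffices: each iteration strictly shrinks r + 1 - l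
def aLoop (hash : Int) (text : String) : Nat → Int → Int → Int
  | 0, l, _ => l
  | fuel + 1, l, r =>
    if l ≤ r then
      if nsa_encrypt (PySem.Int.floordiv (l + r) 2) text < hash then
        aLoop hash text fuel (PySem.Int.floordiv (l + r) 2 + 1) r
      else
        aLoop hash text fuel l (PySem.Int.floordiv (l + r) 2 - 1)
    else l

def find_near_key (hash : Int) (sample_text : String) : Int :=
  let l : Int := 0
  let r : Int := PySem.Int.floordiv hash 2
  let _lens : Int := (sample_text.toList.length : Int)
  aLoop hash sample_text (r + 1 - l).toNat l r

-- ===== PORT B =====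
-- (Source B reuses the module helper nsa_encrypt verbatim; it is defined once above.)

-- while 2 * b <= n: b = 2 * b — fuel n.toNat + 1 suffices (b starts at 1 and grows)
def upLoop (n : Int) : Nat → Int → Int
  | 0, b => b
  | fuel + 1, b => if 2 * b ≤ n then upLoop n fuel (2 * b) else b

-- while b >= 1: … b = b // 2 — fuel b.toNat + 1 suffices (b strictly shrinks while ≥ 1)
def bitLoop (hash : Int) (text : String) (n : Int) : Nat → Int → Int → Int
  | 0, c, _ => c
  | fuel + 1, c, b =>
    if 1 ≤ b then
      if c + b ≤ n ∧ nsa_encrypt (c + b - 1) text < hash then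
        bitLoop hash text n fuel (c + b) (PySem.Int.floordiv b 2)
      else
        bitLoop hash text n fuel c (PySem.Int.floordiv b 2)
    else c

def find_near_key_alt (hash : Int) (sample_text : String) : Int :=
  let n : Int := PySem.Int.floordiv hash 2 + 1
  let b : Int := upLoop n (n.toNat + 1) 1
  bitLoop hash sample_text n (b.toNat + 1) 0 b

-- ===== PRECONDITION & SPEC =====
def Spec_find_near_key (hash : Int) (sample_text : String) (out : Int) : Prop := out = find_near_key_alt hash sample_text
instance (hash : Int) (sample_text : String) (out : Int) : Decidable (Spec_find_near_key hash sample_text out) := by unfold Spec_find_near_key; infer_instance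

-- ===== CLAIM (what is proved, stated in full; the proofs are below) =====
def Claim_equal_find_near_key : Prop := ∀ (hash : Int) (sample_text : String), Dom_find_near_key hash sample_text → Spec_find_near_key hash sample_text (find_near_key hash sample_text)

-- ===== LEMMAS AND PROOFS =====

theorem pyOrd1_nonneg (cs : List Char) : 0 ≤ pyOrd1 cs := by
  unfold pyOrd1
  split
  · positivity
  · exact le_refl 0

/-- The encryption fold is non-negative and monotone in (key, accumulator). -/
theorem encFold_nonneg_mono (text : String) (l : List Int) :
    ∀ (k1 k2 a1 a2 : Int), 0 ≤ k1 → k1 ≤ k2 → 0 ≤ a1 → a1 ≤ a2 →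
      0 ≤ l.foldl (fun result i =>
            (result + pyOrd1 (PySem.List.slice text.toList (some i) (some (i + 1)))) * k1) a1 ∧
      l.foldl (fun result i =>
            (result + pyOrd1 (PySem.List.slice text.toList (some i) (some (i + 1)))) * k1) a1 ≤
      l.foldl (fun result i =>
            (result + pyOrd1 (PySem.List.slice text.toList (some i) (some (i + 1)))) * k2) a2 := by
  induction l with
  | nil =>
      intro k1 k2 a1 a2 hk1 hk12 ha1 ha12
      exact ⟨ha1, ha12⟩
  | cons i is ih =>
      intro k1 k2 a1 a2 hk1 hk12 ha1 ha12
      simp only [List.foldl_cons]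
      have ho := pyOrd1_nonneg (PySem.List.slice text.toList (some i) (some (i + 1)))
      refine ih k1 k2 _ _ hk1 hk12 ?_ ?_
      · exact mul_nonneg (by omega) hk1
      · exact mul_le_mul (by omega) hk12 hk1 (by omega)

theorem enc_mono (k1 k2 : Int) (text : String) (hk1 : 0 ≤ k1) (hk12 : k1 ≤ k2) :
    nsa_encrypt k1 text ≤ nsa_encrypt k2 text :=
  (encFold_nonneg_mono text _ k1 k2 0 0 hk1 hk12 le_rfl le_rfl).2

/-- Characterisation of the answer: the first key `a` in `[0, U+1]` whose encryption
    reaches `hash` (with `U+1` meaning "none in `[0, U]`"). -/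
def GoodRes (hash : Int) (text : String) (U a : Int) : Prop :=
  0 ≤ a ∧ a ≤ U + 1 ∧ (∀ x : Int, 0 ≤ x → x < a → nsa_encrypt x text < hash) ∧
    (a ≤ U → hash ≤ nsa_encrypt a text)

theorem goodRes_unique (hash : Int) (text : String) (U a b : Int)
    (ha : GoodRes hash text U a) (hb : GoodRes hash text U b) : a = b := by
  obtain ⟨ha0, haU, haPre, haAt⟩ := ha
  obtain ⟨hb0, hbU, hbPre, hbAt⟩ := hb
  rcases lt_trichotomy a b with h | h | h
  · have h1 := hbPre a ha0 h
    have h2 := haAt (by omega)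
    omega
  · exact h
  · have h1 := haPre b hb0 h
    have h2 := hbAt (by omega)
    omega

theorem aLoop_good : ∀ (fuel : Nat) (hash : Int) (text : String) (U l r : Int),
    (r + 1 - l).toNat ≤ fuel → 0 ≤ l → l ≤ r + 1 → r ≤ U →
    (∀ x : Int, 0 ≤ x → x < l → nsa_encrypt x text < hash) →
    (∀ x : Int, r < x → x ≤ U → hash ≤ nsa_encrypt x text) →
    GoodRes hash text U (aLoop hash text fuel l r) := by
  intro fuel
  induction fuel with
  | zero =>
      intro hash text U l r hfuel hl0 hlr1 hrU hpre hsuf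
      have hlr : r < l := by omega
      rw [aLoop]
      refine ⟨hl0, by omega, hpre, fun hU => hsuf l (by omega) hU⟩
  | succ fuel ih =>
      intro hash text U l r hfuel hl0 hlr1 hrU hpre hsuf
      rw [aLoop]
      by_cases h : l ≤ r
      · simp only [h, if_pos]
        have hc := PySem.Int.floordiv_two_mid_bounds h
        set c := PySem.Int.floordiv (l + r) 2 with hcdef
        by_cases he : nsa_encrypt c text < hash
        · simp only [he, if_pos]
          refine ih hash text U (c + 1) r (by omega) (by omega) (by omega) hrU ?_ hsuf
          intro x hx0 hxc
          by_cases hxl : x < l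
          · exact hpre x hx0 hxl
          · calc nsa_encrypt x text ≤ nsa_encrypt c text :=
                  enc_mono x c text hx0 (by omega)
              _ < hash := he
        · simp only [he, if_false]
          refine ih hash text U l (c - 1) (by omega) hl0 (by omega) (by omega) hpre ?_
          intro x hxc hxU
          by_cases hxr : r < x
          · exact hsuf x hxr hxU
          · calc hash ≤ nsa_encrypt c text := not_lt.mp he
              _ ≤ nsa_encrypt x text := enc_mono c x text (by omega) (by omega)
      · simp only [h, if_neg, not_false_iff]
        refine ⟨hl0, by omega, hpre, fun hU => hsuf l (by omega) hU⟩

theorem floordiv_two_pow (k : Nat) :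
    PySem.Int.floordiv ((2 : Int) ^ (k + 1)) 2 = (2 : Int) ^ k := by
  rw [PySem.Int.floordiv_eq_ediv_of_pos (by norm_num), pow_succ, mul_comm]
  exact Int.mul_ediv_cancel_left _ (by norm_num)

theorem bitLoop_zero_b (hash : Int) (text : String) (n : Int) (fuel : Nat) (c : Int) :
    bitLoop hash text n fuel c 0 = c := by
  cases fuel with
  | zero => rfl
  | succ fuel => rw [bitLoop, if_neg (by norm_num)]

theorem bitLoop_good : ∀ (k : Nat) (fuel : Nat) (hash : Int) (text : String) (U c : Int),
    k < fuel → 0 ≤ c → c ≤ U + 1 →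
    (∀ x : Int, 0 ≤ x → x < c → nsa_encrypt x text < hash) →
    (c + 2 * 2 ^ k - 1 ≤ U → hash ≤ nsa_encrypt (c + 2 * 2 ^ k - 1) text) →
    GoodRes hash text U (bitLoop hash text (U + 1) fuel c ((2 : Int) ^ k)) := by
  intro k
  induction k with
  | zero =>
      intro fuel hash text U c hfuel hc0 hcU hpre hbound
      obtain ⟨fuel, rfl⟩ : ∃ f, fuel = f + 1 := ⟨fuel - 1, by omega⟩
      rw [bitLoop]
      simp only [pow_zero]
      rw [if_pos (by norm_num : (1:Int) ≤ 1)]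
      by_cases h : c + 1 ≤ U + 1 ∧ nsa_encrypt (c + 1 - 1) text < hash
      · rw [if_pos h]
        rw [show PySem.Int.floordiv (1:Int) 2 = 0 by decide, bitLoop_zero_b]
        obtain ⟨h1, h2⟩ := h
        refine ⟨by omega, h1, ?_, ?_⟩
        · intro x hx0 hxc
          by_cases hxl : x < c
          · exact hpre x hx0 hxl
          · have hx : x = c := by omega
            simpa [hx] using (by simpa using h2)
        · intro hU
          have hb := hbound (by omega)
          have he : c + 2 * 2 ^ 0 - 1 = c + 1 := by ring
          rwa [he] at hb
      · rw [if_neg h]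
        rw [show PySem.Int.floordiv (1:Int) 2 = 0 by decide, bitLoop_zero_b]
        refine ⟨hc0, hcU, hpre, fun hU => ?_⟩
        rcases not_and_or.mp h with h1 | h2
        · omega
        · have := not_lt.mp h2
          simpa using this
  | succ k ihk =>
      intro fuel hash text U c hfuel hc0 hcU hpre hbound
      obtain ⟨fuel, rfl⟩ : ∃ f, fuel = f + 1 := ⟨fuel - 1, by omega⟩
      rw [bitLoop]
      rw [if_pos (one_le_pow₀ (by norm_num : (1:Int) ≤ 2) : (1:Int) ≤ 2 ^ (k + 1))]
      rw [floordiv_two_pow k]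
      by_cases h : c + 2 ^ (k + 1) ≤ U + 1 ∧ nsa_encrypt (c + 2 ^ (k + 1) - 1) text < hash
      · rw [if_pos h]
        obtain ⟨h1, h2⟩ := h
        refine ihk fuel hash text U (c + 2 ^ (k + 1)) (by omega)
          (add_nonneg hc0 (by positivity)) h1 ?_ ?_
        · intro x hx0 hxc
          by_cases hxl : x < c
          · exact hpre x hx0 hxl
          · calc nsa_encrypt x text
                ≤ nsa_encrypt (c + 2 ^ (k + 1) - 1) text :=
                  enc_mono _ _ text hx0 (by omega)
              _ < hash := h2
        · intro hU
          have heq : c + 2 ^ (k + 1) + 2 * 2 ^ k - 1 = c + 2 * 2 ^ (k + 1) - 1 := by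
            rw [pow_succ]; ring
          rw [heq]
          exact hbound (by omega)
      · rw [if_neg h]
        refine ihk fuel hash text U c (by omega) hc0 hcU hpre ?_
        intro hU
        have heq : c + 2 * 2 ^ k - 1 = c + 2 ^ (k + 1) - 1 := by
          rw [pow_succ]; ring
        rw [heq] at hU ⊢
        rcases not_and_or.mp h with h1 | h2
        · omega
        · exact not_lt.mp h2

theorem upLoop_spec : ∀ (fuel : Nat) (n b : Int), (n - b).toNat < fuel → (∃ k : Nat, b = 2 ^ k) →
    ∃ k : Nat, upLoop n fuel b = 2 ^ k ∧ n < 2 * 2 ^ k := by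
  intro fuel
  induction fuel with
  | zero => intro n b h; omega
  | succ fuel ih =>
      intro n b hfuel hb
      obtain ⟨k, rfl⟩ := hb
      have hk1 : (1:Int) ≤ 2 ^ k := one_le_pow₀ (by norm_num)
      rw [upLoop]
      by_cases h : 2 * (2:Int) ^ k ≤ n
      · rw [if_pos h]
        have h2 : (2:Int) * 2 ^ k = 2 ^ (k + 1) := by rw [pow_succ]; ring
        exact ih n (2 * 2 ^ k) (by omega) ⟨k + 1, h2⟩
      · rw [if_neg h]
        exact ⟨k, rfl, by omega⟩

theorem loops_eq (hash : Int) (sample_text : String) (U : Int) :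
    aLoop hash sample_text (U + 1 - 0).toNat 0 U =
      bitLoop hash sample_text (U + 1)
        ((upLoop (U + 1) ((U + 1).toNat + 1) 1).toNat + 1) 0
        (upLoop (U + 1) ((U + 1).toNat + 1) 1) := by
  by_cases h0 : 0 ≤ U
  · have hA : GoodRes hash sample_text U (aLoop hash sample_text (U + 1 - 0).toNat 0 U) :=
      aLoop_good (U + 1 - 0).toNat hash sample_text U 0 U le_rfl le_rfl (by omega) le_rfl
        (fun x hx0 hx => by omega) (fun x hx hxU => by omega)
    obtain ⟨k, hk, hkn⟩ :=
      upLoop_spec ((U + 1).toNat + 1) (U + 1) 1 (by omega) ⟨0, by norm_num⟩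
    rw [hk]
    have hkt : ((2:Int) ^ k).toNat = 2 ^ k := by
      rw [show ((2:Int) ^ k) = ((2 ^ k : Nat) : Int) by push_cast; ring]
      exact Int.toNat_natCast _
    have hkfuel : k < ((2:Int) ^ k).toNat + 1 := by
      rw [hkt]
      exact Nat.lt_succ_of_lt (Nat.lt_two_pow_self)
    have hB : GoodRes hash sample_text U
        (bitLoop hash sample_text (U + 1) (((2:Int) ^ k).toNat + 1) 0 ((2:Int) ^ k)) :=
      bitLoop_good k (((2:Int) ^ k).toNat + 1) hash sample_text U 0 hkfuel le_rfl (by omega)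
        (fun x hx0 hx => by omega) (fun hbd => by omega)
    exact goodRes_unique hash sample_text U _ _ hA hB
  · -- empty range: both sides return 0
    have hA : aLoop hash sample_text (U + 1 - 0).toNat 0 U = 0 := by
      have h : (U + 1 - 0).toNat = 0 := by omega
      rw [h, aLoop]
    have hup : upLoop (U + 1) ((U + 1).toNat + 1) 1 = 1 := by
      have h : (U + 1).toNat = 0 := by omega
      rw [h, upLoop, if_neg (by omega)]
    rw [hA, hup]
    rw [show ((1:Int).toNat + 1) = 2 by norm_num]
    rw [bitLoop, if_pos (le_refl (1:Int))]
    rw [if_neg (by omega : ¬ ((0:Int) + 1 ≤ U + 1 ∧ nsa_encrypt (0 + 1 - 1) sample_text < hash))]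
    rw [show PySem.Int.floordiv (1:Int) 2 = 0 by decide, bitLoop_zero_b]

theorem find_near_key_eq (hash : Int) (sample_text : String) :
    find_near_key hash sample_text = find_near_key_alt hash sample_text :=
  loops_eq hash sample_text (PySem.Int.floordiv hash 2)

-- ===== VERDICT (by name: the statement is the Claim_ definition above) =====
theorem find_near_key_spec : Claim_equal_find_near_key := by
  intro hash sample_text _
  unfold Spec_find_near_key
  exact find_near_key_eq hash sample_text
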